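-- pv_equiv track=rewrite | github.com/alliedvision/VmbPy | vimba/c_binding/vimba_common.py | _split_into_powers_of_two
-- ===== SOURCE A (Python) =====
-- from typing import Tuple, Optional
--
-- def _split_into_powers_of_two(num: int) -> Tuple[int, ...]:
--     result = []
--     for mask in [1 << i for i in range(32)]:
--         if mask & num:
--             result.append(mask)
--
--     if not result:
--         result.append(0)
--
--     return tuple(result)
-- ===== SOURCE B (Python) =====
-- def _split_into_powers_of_two(num):
--     # Kernighan bit-clearing: each iteration removes the lowest set bit
--     # of the 32-bit window, so the loop runs once per set bit only.
--     n = num % 0x100000000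
--     result = []
--     while n:
--         rest = n & (n - 1)       # n with its lowest set bit cleared
--         result.append(n - rest)  # the lowest set bit itself
--         n = rest
--     return tuple(result) if result else (0,)
-- ===== Notes on version B (the rewrite author's own statement) =====
-- stated objective: alternative
-- what changed: Instead of scanning every precomputed single-bit mask of the low word and testing each against num, B reduces num to its low word once and then runs Kernighan's bit-clearing loop (rest = n & (n-1)), emitting the lowest set bit each round, so it iterates once per set bit rather than once per bit position.
import Mathlib
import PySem

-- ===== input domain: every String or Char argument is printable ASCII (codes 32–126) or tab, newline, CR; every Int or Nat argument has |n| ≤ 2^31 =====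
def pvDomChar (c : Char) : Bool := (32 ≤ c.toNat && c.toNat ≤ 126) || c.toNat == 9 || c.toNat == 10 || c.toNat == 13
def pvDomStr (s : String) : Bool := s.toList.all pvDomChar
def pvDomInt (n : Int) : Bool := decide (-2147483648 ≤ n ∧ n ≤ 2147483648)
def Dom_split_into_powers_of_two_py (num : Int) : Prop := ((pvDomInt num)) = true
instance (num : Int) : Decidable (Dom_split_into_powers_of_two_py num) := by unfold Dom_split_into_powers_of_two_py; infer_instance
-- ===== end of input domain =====

-- B replaces A's scan of all 32 precomputed masks by a single 32-bit reduction (num % 2^32)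
-- followed by Kernighan's bit-clearing loop (rest = n & (n-1)): one iteration per SET bit,
-- each emitting the lowest set bit (n - rest) and clearing it.

-- ===== PORT A =====
def split_into_powers_of_two_py (num : Int) : List Int :=
  -- masks = [1 << i for i in range(32)]
  let masks : List Int := (List.range 32).map (fun i : Nat => (1 : Int) <<< i)
  -- for mask in masks: if mask & num: result.append(mask)
  let result := masks.foldl (fun acc mask => if PySem.Int.band mask num ≠ 0 then acc ++ [mask] else acc) ([] : List Int)
  -- if not result: result.append(0)
  if result = [] then result ++ [0] else result

-- ===== PORT B =====
-- used by the port's termination argument, so it must precede the port: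
-- for positive n, n & (n-1) is the Nat-level clear-lowest-bit, hence < n
theorem band_pred_eq (n : Int) (h : 0 < n) :
    PySem.Int.band n (n - 1) = ((n.toNat &&& (n.toNat - 1) : Nat) : Int) := by
  have h1 : n = ((n.toNat : Nat) : Int) := by omega
  have h2 : n - 1 = ((n.toNat - 1 : Nat) : Int) := by omega
  have hb := PySem.Int.band_natCast n.toNat (n.toNat - 1)
  rw [← h1, ← h2] at hb
  exact hb

theorem band_pred_toNat_lt (n : Int) (h : 0 < n) :
    (PySem.Int.band n (n - 1)).toNat < n.toNat := by
  rw [band_pred_eq n h, Int.toNat_natCast]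
  have := Nat.and_le_right (n := n.toNat) (m := n.toNat - 1)
  omega

-- the 'while n:' loop of Source B; n starts as num % 2**32 and only decreases toward 0,
-- so Python's 'n' truthiness test is ported as '0 < n'
def splitAltGo (n : Int) : List Int :=
  if h : 0 < n then
    let rest := PySem.Int.band n (n - 1)   -- n with its lowest set bit cleared
    (n - rest) :: splitAltGo rest          -- append the lowest set bit, continue on rest
  else []
termination_by n.toNat
decreasing_by exact band_pred_toNat_lt n h

def split_into_powers_of_two_py_alt (num : Int) : List Int :=
  let n := PySem.Int.mod num 4294967296
  let result := splitAltGo n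
  if result = [] then [0] else result

-- ===== PRECONDITION & SPEC =====
def Spec_split_into_powers_of_two_py (num : Int) (out : List Int) : Prop := out = split_into_powers_of_two_py_alt num
instance (num : Int) (out : List Int) : Decidable (Spec_split_into_powers_of_two_py num out) := by unfold Spec_split_into_powers_of_two_py; infer_instance

-- ===== CLAIM (what is proved, stated in full; the proofs are below) =====
def Claim_equal_split_into_powers_of_two_py : Prop := ∀ (num : Int), Dom_split_into_powers_of_two_py num → Spec_split_into_powers_of_two_py num (split_into_powers_of_two_py num)

-- ===== LEMMAS AND PROOFS =====

-- Python's 1 << i as a Nat power cast to Int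
theorem one_shl_eq (i : Nat) : ((1 : Int) <<< i) = ((2 ^ i : Nat) : Int) := by
  have : ((1 : Int) <<< i) = (((1 <<< i : Nat) : Int)) := rfl
  rw [this, Nat.shiftLeft_eq, one_mul]

-- the mask test of A reads bit i of num (two's complement)
theorem band_two_pow_ne_zero (a : Int) (i : Nat) :
    (PySem.Int.band ((2 ^ i : Nat) : Int) a ≠ 0) ↔ a.testBit i = true := by
  rcases a with m | m
  · show PySem.Int.band ((2 ^ i : Nat) : Int) ((m : Nat) : Int) ≠ 0 ↔ Nat.testBit m i = true
    rw [PySem.Int.band_natCast, Nat.two_pow_and]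
    cases hb : Nat.testBit m i <;> simp [hb, Nat.pow_eq_zero]
  · show PySem.Int.band ((2 ^ i : Nat) : Int) (Int.negSucc m) ≠ 0 ↔ (!(Nat.testBit m i)) = true
    have h0 : (0 : Int) ≤ ((2 ^ i : Nat) : Int) := by positivity
    have hneg : ¬ (0 : Int) ≤ Int.negSucc m := by
      simp [Int.negSucc_eq]; omega
    unfold PySem.Int.band
    rw [if_pos h0, if_neg hneg]
    have h1 : (-(Int.negSucc m) - 1).toNat = m := by
      simp [Int.negSucc_eq]
    have h2 : (((2 ^ i : Nat) : Int)).toNat = 2 ^ i := Int.toNat_natCast _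
    rw [h1, h2, Nat.two_pow_and]
    cases hb : Nat.testBit m i <;> simp [hb, Nat.pow_eq_zero]

-- bit i (i < 32) of num equals bit i of num % 2^32 (as a Nat)
theorem testBit_emod_two_pow (a : Int) (i : Nat) (h : i < 32) :
    Nat.testBit ((a % 4294967296).toNat) i = a.testBit i := by
  rcases a with m | m
  · show Nat.testBit (((m : Int) % 4294967296).toNat) i = Nat.testBit m i
    have e : ((m : Int) % 4294967296).toNat = m % 2 ^ 32 := by
      have e2 : (2 : Nat) ^ 32 = 4294967296 := by norm_num
      omega
    rw [e, Nat.testBit_mod_two_pow]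
    simp [h]
  · show Nat.testBit ((Int.negSucc m % 4294967296).toNat) i = !(Nat.testBit m i)
    obtain ⟨q, r, hm, hr⟩ : ∃ q r, m = 2 ^ 32 * q + r ∧ r < 2 ^ 32 :=
      ⟨m / 2 ^ 32, m % 2 ^ 32, (Nat.div_add_mod m (2 ^ 32)).symm, Nat.mod_lt _ (by norm_num)⟩
    have e2 : (2 : Nat) ^ 32 = 4294967296 := by norm_num
    have key : (Int.negSucc m % 4294967296).toNat = 2 ^ 32 - (r + 1) := by
      rw [Int.negSucc_eq]
      omega
    rw [key, Nat.testBit_two_pow_sub_succ hr]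
    have hrm : Nat.testBit r i = Nat.testBit m i := by
      have : r = m % 2 ^ 32 := by omega
      rw [this, Nat.testBit_mod_two_pow]
      simp [h]
    simp [h, hrm]

-- clearing the lowest bit of an odd number: (2a+1) & 2a = 2a
theorem and_odd (a : Nat) : (2*a+1) &&& (2*a) = 2*a := by
  apply Nat.eq_of_testBit_eq
  intro i
  cases i with
  | zero => simp [Nat.testBit_zero, Nat.mul_mod_right]
  | succ i =>
    simp only [Nat.testBit_succ, Nat.and_div_two, Nat.testBit_and]
    have h1 : (2*a+1)/2 = a := by omega
    have h2 : (2*a)/2 = a := by omega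
    simp [h1, h2]

-- clearing the lowest bit commutes with doubling: 2a & (2a-1) = 2(a & (a-1))
theorem and_even (a : Nat) : (2*a) &&& (2*a - 1) = 2*(a &&& (a-1)) := by
  apply Nat.eq_of_testBit_eq
  intro i
  cases i with
  | zero => simp [Nat.testBit_zero, Nat.mul_mod_right]
  | succ i =>
    simp only [Nat.testBit_succ, Nat.and_div_two, Nat.testBit_and]
    have h1 : (2*a)/2 = a := by omega
    have h2 : (2*a-1)/2 = a-1 := by omega
    have h3 : (2*(a &&& (a-1)))/2 = a &&& (a-1) := by omega
    simp [h1, h2, h3, Nat.testBit_and]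

theorem splitAltGo_nonpos (n : Int) (h : ¬ 0 < n) : splitAltGo n = [] := by
  rw [splitAltGo, dif_neg h]

-- doubling the argument doubles every emitted power
theorem splitAltGo_two_mul (a : Nat) :
    splitAltGo ((2*a : Nat) : Int) = (splitAltGo ((a : Nat) : Int)).map (· * 2) := by
  induction a using Nat.strong_induction_on with
  | _ a ih =>
    rcases Nat.eq_zero_or_pos a with h0 | h0
    · subst h0
      simp [splitAltGo_nonpos]
    · have hpos2 : (0 : Int) < ((2*a : Nat) : Int) := by exact_mod_cast (by omega : 0 < 2*a)
      have hpos : (0 : Int) < ((a : Nat) : Int) := by exact_mod_cast h0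
      rw [splitAltGo, dif_pos hpos2]
      conv_rhs => rw [splitAltGo, dif_pos hpos]
      have hr2 : PySem.Int.band ((2*a : Nat) : Int) (((2*a : Nat) : Int) - 1)
          = ((2*(a &&& (a-1)) : Nat) : Int) := by
        rw [band_pred_eq _ hpos2, Int.toNat_natCast, and_even]
      have hr : PySem.Int.band ((a : Nat) : Int) (((a : Nat) : Int) - 1)
          = (((a &&& (a-1)) : Nat) : Int) := by
        rw [band_pred_eq _ hpos, Int.toNat_natCast]
      simp only [hr2, hr]
      have hlt : a &&& (a-1) < a := by
        have := Nat.and_le_right (n := a) (m := a - 1)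
        omega
      rw [ih _ hlt, List.map_cons]
      congr 1
      push_cast
      ring

-- an odd argument emits 1 first, then continues on the even remainder
theorem splitAltGo_odd (a : Nat) :
    splitAltGo ((2*a+1 : Nat) : Int) = 1 :: splitAltGo ((2*a : Nat) : Int) := by
  have hpos : (0 : Int) < ((2*a+1 : Nat) : Int) := by exact_mod_cast (by omega : 0 < 2*a+1)
  rw [splitAltGo, dif_pos hpos]
  have hr : PySem.Int.band ((2*a+1 : Nat) : Int) (((2*a+1 : Nat) : Int) - 1)
      = ((2*a : Nat) : Int) := by
    rw [band_pred_eq _ hpos, Int.toNat_natCast]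
    simp only [Nat.add_sub_cancel, and_odd]
  simp only [hr]
  congr 1
  push_cast
  ring

-- B's loop produces exactly the set-bit powers of its (nonnegative) argument, low to high
theorem splitAltGo_spec (c : Nat) : ∀ (n : Nat), n < 2 ^ c →
    splitAltGo (n : Int)
      = ((List.range c).filter (fun i => n.testBit i)).map (fun i => ((2 ^ i : Nat) : Int)) := by
  induction c with
  | zero =>
    intro n hn
    have : n = 0 := by omega
    subst this
    simp [splitAltGo_nonpos]
  | succ c ih =>
    intro n hn
    have hsplit : n = 2 * (n / 2) + n % 2 := by omega
    set a := n / 2 with ha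
    have halt : a < 2 ^ c := by
      have : (2:Nat) ^ (c+1) = 2 * 2 ^ c := by ring
      omega
    have hstep : ((List.range (c+1)).filter (fun i => n.testBit i)).map (fun i => ((2 ^ i : Nat) : Int))
        = (if n % 2 = 1 then [((1:Nat) : Int)] else [])
          ++ (((List.range c).filter (fun i => a.testBit i)).map (fun i => ((2 ^ i : Nat) : Int))).map (· * 2) := by
      rw [List.range_succ_eq_map, List.filter_cons]
      have hmap : ((List.range c).map (· + 1)).filter (fun i => n.testBit i)
          = ((List.range c).filter (fun i => a.testBit i)).map (· + 1) := by
        rw [List.filter_map]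
        congr 1
        apply List.filter_congr
        intro x _
        simp [Function.comp, Nat.testBit_add_one, ha]
      have hmaps : List.map (fun i => ((2 ^ i : Nat) : Int)) (List.map (· + 1) ((List.range c).filter (fun i => a.testBit i)))
          = (((List.range c).filter (fun i => a.testBit i)).map (fun i => ((2 ^ i : Nat) : Int))).map (· * 2) := by
        rw [List.map_map, List.map_map]
        apply List.map_congr_left
        intro x _
        simp only [Function.comp]
        push_cast
        ring
      have hbit0 : n.testBit 0 = decide (n % 2 = 1) := by
        simp [Nat.testBit_zero]
      by_cases hpar : n % 2 = 1
      · rw [if_pos (by simp [hbit0, hpar]), if_pos hpar, hmap, List.map_cons, hmaps]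
        norm_num
      · rw [if_neg (by simp [hbit0, hpar]), if_neg hpar, hmap, hmaps]
        simp
    rw [hstep]
    by_cases hpar : n % 2 = 1
    · have hn' : n = 2*a + 1 := by omega
      rw [if_pos hpar, hn', splitAltGo_odd, splitAltGo_two_mul, ih a halt]
      simp
    · have hn' : n = 2*a := by omega
      rw [if_neg hpar, hn', splitAltGo_two_mul, ih a halt]
      simp

-- ===== VERDICT (by name: the statement is the Claim_ definition above) =====
theorem split_into_powers_of_two_py_spec : Claim_equal_split_into_powers_of_two_py := by
  intro num _
  show split_into_powers_of_two_py num = split_into_powers_of_two_py_alt num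
  -- the 32-bit window of num, as a Nat
  set m : Nat := (num % 4294967296).toNat with hmdef
  have hnn : 0 ≤ num % 4294967296 := Int.emod_nonneg num (by norm_num)
  have hcast : num % 4294967296 = ((m : Nat) : Int) := by omega
  have hmlt : m < 2 ^ 32 := by
    have := Int.emod_lt_of_pos num (show (0 : Int) < 4294967296 by norm_num)
    omega
  -- B's value
  have hmod : PySem.Int.mod num 4294967296 = ((m : Nat) : Int) := by
    rw [PySem.Int.mod_eq_emod_of_pos (by norm_num), hcast]
  have hB : splitAltGo (PySem.Int.mod num 4294967296)
      = ((List.range 32).filter (fun i => m.testBit i)).map (fun i => ((2 ^ i : Nat) : Int)) := by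
    rw [hmod, splitAltGo_spec 32 m hmlt]
  -- A's value
  have hA : ((List.range 32).map (fun i : Nat => (1 : Int) <<< i)).foldl
        (fun acc mask => if PySem.Int.band mask num ≠ 0 then acc ++ [mask] else acc) ([] : List Int)
      = ((List.range 32).filter (fun i => m.testBit i)).map (fun i => ((2 ^ i : Nat) : Int)) := by
    rw [PySem.List.foldl_append_ite_eq_filter, List.nil_append, List.filter_map]
    have hfc : (List.range 32).filter ((fun mask => decide (PySem.Int.band mask num ≠ 0)) ∘ (fun i : Nat => (1 : Int) <<< i))
        = (List.range 32).filter (fun i => m.testBit i) := by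
      apply List.filter_congr
      intro i hi
      have hi32 : i < 32 := List.mem_range.mp hi
      simp only [Function.comp, one_shl_eq]
      rw [hmdef, testBit_emod_two_pow num i hi32]
      cases hbt : num.testBit i
      · have hz : PySem.Int.band ((2 ^ i : Nat) : Int) num = 0 := by
          by_contra hc
          have hf := (band_two_pow_ne_zero num i).mp hc
          rw [hbt] at hf
          exact Bool.false_ne_true hf
        push_cast at hz
        simp [hz]
      · have hz : PySem.Int.band ((2 ^ i : Nat) : Int) num ≠ 0 := (band_two_pow_ne_zero num i).mpr hbt
        push_cast at hz
        simp [hz]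
    rw [hfc]
    apply List.map_congr_left
    intro x _
    rw [one_shl_eq]
  simp only [split_into_powers_of_two_py, split_into_powers_of_two_py_alt]
  rw [hA, hB]
  split_ifs with h
  · rw [h]
    rfl
  · rfl
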